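-- pv_equiv track=rewrite | github.com/de-ansh/web_search_agent | backend/src/core/similarity_detector.py | _are_domains_compatible
-- ===== SOURCE A (Python) =====
-- from typing import List, Dict, Any, Optional, Tuple, ClassVar
--
-- def _are_domains_compatible(domains1: List[str], domains2: List[str]) -> bool:
--     """Check if two sets of domains are compatible"""
--     if not domains1 or not domains2:
--         return True  # No specific domain detected
--
--     # Check for exact matches
--     if set(domains1) & set(domains2):
--         return True
--
--     # Check for incompatible domains
--     incompatible_pairs = [
--         ("web_automation", "programming_languages"),
--         ("web_frameworks", "databases"),
--         ("testing_tools", "cloud_platforms"),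
--         ("programming_languages", "web_frameworks"),
--         ("databases", "cloud_platforms"),
--         ("version_control", "testing_tools")
--     ]
--
--     for domain1 in domains1:
--         for domain2 in domains2:
--             for pair in incompatible_pairs:
--                 if (domain1 in pair and domain2 in pair) and domain1 != domain2:
--                     return False
--
--     return True
-- ===== SOURCE B (Python) =====
-- from typing import List
--
-- _INCOMPATIBLE_PAIRS = [
--     ("web_automation", "programming_languages"),
--     ("web_frameworks", "databases"),
--     ("testing_tools", "cloud_platforms"),
--     ("programming_languages", "web_frameworks"),
--     ("databases", "cloud_platforms"),
--     ("version_control", "testing_tools"),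
-- ]
--
-- def _are_domains_compatible(domains1: List[str], domains2: List[str]) -> bool:
--     """Check if two sets of domains are compatible"""
--     if not domains1 or not domains2:
--         return True
--     set1, set2 = set(domains1), set(domains2)
--     if set1 & set2:
--         return True
--     for a, b in _INCOMPATIBLE_PAIRS:
--         if (a in set1 and b in set2) or (b in set1 and a in set2):
--             return False
--     return True
-- ===== Notes on version B (the rewrite author's own statement) =====
-- stated objective: alternative
-- what changed: B replaces A's triple nested scan over domains1 x domains2 x pairs with a single pass over the six incompatible pairs, answering each with set-membership lookups.
import Mathlib
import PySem

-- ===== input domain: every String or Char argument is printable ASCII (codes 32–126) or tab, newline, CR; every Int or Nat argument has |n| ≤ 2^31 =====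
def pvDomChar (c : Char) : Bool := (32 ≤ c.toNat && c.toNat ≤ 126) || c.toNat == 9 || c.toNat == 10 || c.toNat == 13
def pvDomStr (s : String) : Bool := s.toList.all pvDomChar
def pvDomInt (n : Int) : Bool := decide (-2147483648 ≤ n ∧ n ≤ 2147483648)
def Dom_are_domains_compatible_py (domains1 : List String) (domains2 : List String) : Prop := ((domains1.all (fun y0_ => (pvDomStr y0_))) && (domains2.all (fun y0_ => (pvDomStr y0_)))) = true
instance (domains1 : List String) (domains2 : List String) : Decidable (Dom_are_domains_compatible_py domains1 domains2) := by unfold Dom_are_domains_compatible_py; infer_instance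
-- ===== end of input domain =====

-- ===== PORT A =====
-- B replaces A's triple nested scan over domains1 × domains2 × pairs with one pass over the six incompatible pairs, using set-membership lookups.
def pvIncompatiblePairs : List (String × String) :=
  [("web_automation", "programming_languages"),
   ("web_frameworks", "databases"),
   ("testing_tools", "cloud_platforms"),
   ("programming_languages", "web_frameworks"),
   ("databases", "cloud_platforms"),
   ("version_control", "testing_tools")]

def are_domains_compatible_py (domains1 : List String) (domains2 : List String) : Bool :=
  if domains1 = [] || domains2 = [] then true
  else if PySem.Set.inter (PySem.Set.ofList domains1) (PySem.Set.ofList domains2) ≠ [] then true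
  else if domains1.any (fun domain1 => domains2.any (fun domain2 =>
          pvIncompatiblePairs.any (fun pair =>
            ((domain1 == pair.1 || domain1 == pair.2) && (domain2 == pair.1 || domain2 == pair.2))
              && domain1 != domain2)))
       then false
  else true

-- ===== PORT B =====
def are_domains_compatible_py_alt (domains1 : List String) (domains2 : List String) : Bool :=
  if domains1 = [] || domains2 = [] then true
  else
    let set1 := PySem.Set.ofList domains1
    let set2 := PySem.Set.ofList domains2
    if PySem.Set.inter set1 set2 ≠ [] then true
    else !(pvIncompatiblePairs.any (fun p =>
      (PySem.Set.contains set1 p.1 && PySem.Set.contains set2 p.2) ||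
      (PySem.Set.contains set1 p.2 && PySem.Set.contains set2 p.1)))

-- ===== PRECONDITION & SPEC =====
def Spec_are_domains_compatible_py (domains1 : List String) (domains2 : List String) (out : Bool) : Prop := out = are_domains_compatible_py_alt domains1 domains2
instance (domains1 : List String) (domains2 : List String) (out : Bool) : Decidable (Spec_are_domains_compatible_py domains1 domains2 out) := by unfold Spec_are_domains_compatible_py; infer_instance

-- ===== CLAIM (what is proved, stated in full; the proofs are below) =====
def Claim_equal_are_domains_compatible_py : Prop := ∀ (domains1 : List String) (domains2 : List String), Dom_are_domains_compatible_py domains1 domains2 → Spec_are_domains_compatible_py domains1 domains2 (are_domains_compatible_py domains1 domains2)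

-- ===== LEMMAS AND PROOFS =====

-- When domains1 and domains2 share no element, A's nested scan and B's pair scan agree.
theorem pv_scan_eq (domains1 domains2 : List String)
    (hdisj : ∀ x, x ∈ domains1 → x ∈ domains2 → False) :
    (domains1.any (fun domain1 => domains2.any (fun domain2 =>
        pvIncompatiblePairs.any (fun pair =>
          ((domain1 == pair.1 || domain1 == pair.2) && (domain2 == pair.1 || domain2 == pair.2))
            && domain1 != domain2))))
    = (pvIncompatiblePairs.any (fun p =>
        (PySem.Set.contains (PySem.Set.ofList domains1) p.1 && PySem.Set.contains (PySem.Set.ofList domains2) p.2) ||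
        (PySem.Set.contains (PySem.Set.ofList domains1) p.2 && PySem.Set.contains (PySem.Set.ofList domains2) p.1))) := by
  rw [Bool.eq_iff_iff]
  simp only [List.any_eq_true, Bool.and_eq_true, Bool.or_eq_true, beq_iff_eq, bne_iff_ne,
    PySem.Set.contains_iff, PySem.Set.mem_ofList]
  constructor
  · rintro ⟨x, hx, y, hy, p, hp, ⟨⟨hx1 | hx2, hy1 | hy2⟩, hne⟩⟩
    · exact absurd (hx1.trans hy1.symm) hne
    · exact ⟨p, hp, Or.inl ⟨hx1 ▸ hx, hy2 ▸ hy⟩⟩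
    · exact ⟨p, hp, Or.inr ⟨hx2 ▸ hx, hy1 ▸ hy⟩⟩
    · exact absurd (hx2.trans hy2.symm) hne
  · rintro ⟨p, hp, ⟨h1, h2⟩ | ⟨h1, h2⟩⟩
    · exact ⟨p.1, h1, p.2, h2, p, hp, ⟨⟨Or.inl rfl, Or.inr rfl⟩,
        fun he => hdisj p.1 h1 (he ▸ h2)⟩⟩
    · exact ⟨p.2, h1, p.1, h2, p, hp, ⟨⟨Or.inr rfl, Or.inl rfl⟩,
        fun he => hdisj p.2 h1 (he ▸ h2)⟩⟩

-- ===== VERDICT (by name: the statement is the Claim_ definition above) =====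
theorem are_domains_compatible_py_spec : Claim_equal_are_domains_compatible_py := by
  intro domains1 domains2 _
  unfold Spec_are_domains_compatible_py are_domains_compatible_py are_domains_compatible_py_alt
  by_cases h0 : (decide (domains1 = []) || decide (domains2 = [])) = true
  · simp only [if_pos h0]
  · by_cases h1 : PySem.Set.inter (PySem.Set.ofList domains1) (PySem.Set.ofList domains2) = []
    · have hdisj : ∀ x, x ∈ domains1 → x ∈ domains2 → False := by
        intro x hx1 hx2
        have hmem : x ∈ PySem.Set.inter (PySem.Set.ofList domains1) (PySem.Set.ofList domains2) := by
          simp [PySem.Set.mem_inter, PySem.Set.mem_ofList, hx1, hx2]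
        rw [h1] at hmem
        exact absurd hmem (List.not_mem_nil)
      simp only [if_neg h0, if_neg (fun h : _ ≠ [] => h h1), pv_scan_eq domains1 domains2 hdisj]
      cases (pvIncompatiblePairs.any (fun p =>
        (PySem.Set.contains (PySem.Set.ofList domains1) p.1 && PySem.Set.contains (PySem.Set.ofList domains2) p.2) ||
        (PySem.Set.contains (PySem.Set.ofList domains1) p.2 && PySem.Set.contains (PySem.Set.ofList domains2) p.1))) <;> simp
    · simp only [if_neg h0, if_pos h1]
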